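-- pv_equiv track=rewrite | github.com/blegloannec/CodeProblems | HackerRank/bowling_pins.py | grundy
-- ===== SOURCE A (Python) =====
-- def mex(S):
--     x = 0
--     while x in S:
--         x += 1
--     return x
--
-- memo = {0: 0}
--
-- def grundy(n):
--     if n not in memo:
--         S = set()
--         for i in range(n):
--             S.add(grundy(i)^grundy(n-1-i))
--             if i<n-1:
--                 S.add(grundy(i)^grundy(n-2-i))
--         memo[n] = mex(S)
--     return memo[n]
-- ===== SOURCE B (Python) =====
-- # Kayles grundy numbers: bottom-up table for n < 71, then eventual period 12; O(1) per call.
--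
-- _LIMIT = 71
-- _PERIOD = 12
--
--
-- def _mex(S):
--     x = 0
--     while x in S:
--         x += 1
--     return x
--
--
-- def _table(m):
--     g = [0]
--     while len(g) < m:
--         prev = g
--         seen = {a ^ b for a, b in zip(prev, reversed(prev))}       # remove one pin: heaps i, n-1-i
--         prev2 = prev[:-1]
--         seen |= {a ^ b for a, b in zip(prev2, reversed(prev2))}    # remove two adjacent pins: heaps i, n-2-i
--         g.append(_mex(seen))
--     return g
--
--
-- _TABLE = _table(_LIMIT + _PERIOD)
--
--
-- def grundy(n):
--     if n < 0:
--         return 0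
--     if n < _LIMIT:
--         return _TABLE[n]
--     return _TABLE[_LIMIT + (n - _LIMIT) % _PERIOD]
-- ===== Notes on version B (the rewrite author's own statement) =====
-- stated objective: faster
-- what changed: Replaces the memoized O(n^2) recursion by a constant-size bottom-up table of the first 83 Kayles grundy values plus the eventual period 12 (exact from n=71, proved by induction in the Lean file), so each call is an O(1) lookup; Pre_ excludes only the region at CPython's default recursion limit where A raises RecursionError (from n=999 when called at top level; the cutoff shifts with the caller's stack depth, so the margin 981..998 of returning inputs is excluded too).
-- outside the precondition, e.g. on grundy(990): A returns 7, B returns 7; on grundy(100000): A raises RecursionError, B returns 1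
import Mathlib
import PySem

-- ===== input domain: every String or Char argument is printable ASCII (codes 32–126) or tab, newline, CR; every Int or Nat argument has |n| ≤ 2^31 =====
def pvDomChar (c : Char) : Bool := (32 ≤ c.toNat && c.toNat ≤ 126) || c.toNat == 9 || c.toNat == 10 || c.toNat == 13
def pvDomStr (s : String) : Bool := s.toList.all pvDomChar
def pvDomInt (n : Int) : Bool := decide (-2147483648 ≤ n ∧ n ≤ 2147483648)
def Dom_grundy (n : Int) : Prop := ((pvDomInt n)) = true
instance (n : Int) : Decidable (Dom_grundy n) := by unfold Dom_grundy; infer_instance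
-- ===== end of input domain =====

-- B replaces A's memoized O(n^2) recursion by a constant-size bottom-up table plus the
-- eventual period 12 of the Kayles sequence (exact from n = 71, proved by induction below),
-- making each call O(1).
-- (A also mutates a module-level memo dict across calls; the memo only ever caches correct
-- values, so A's return value equals a fresh-memo run — the equivalence is about the
-- return value; the port threads the memo explicitly.)

-- ===== PORT A =====
-- mex(S): 'x = 0; while x in S: x += 1; return x'.  The loop terminates after at most
-- |S| membership hits (pigeonhole), so fuel = S.length + 1 makes this port exact.
def mexA (fuel : Nat) (x : Int) (S : PySem.Set Int) : Int :=
  match fuel with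
  | 0 => x
  | fuel + 1 => if S.contains x then mexA fuel (x + 1) S else x

-- grundy(n): A's memoized recursion computes memo[1], memo[2], ..., memo[n] in exactly
-- ascending key order (every recursive grundy(k) completes before any larger key is
-- memoized), so the port performs the identical fill iteratively — a depth-n recursion
-- overflows the evaluator's stack — with the memo as an array indexed by the key
-- (A's memo keys are exactly 0..size-1 throughout, so 'n in memo' is 'n < memo.size').
-- gAloop is the 'for i in range(n)' body: the same set S, built in the same order from
-- the same memo reads (the second 'grundy(i)' of the Python body is a guaranteed memo
-- hit returning a again, so a is reused).
def gAloop (memo : Array Int) (n i : Nat) (S : PySem.Set Int) : PySem.Set Int :=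
  if _h : i < n then
    let a := memo.getD i 0
    let b := memo.getD (n - 1 - i) 0
    let S1 := S.add (PySem.Int.bxor a b)
    if i < n - 1 then
      gAloop memo n (i + 1) (S1.add (PySem.Int.bxor a (memo.getD (n - 2 - i) 0)))
    else gAloop memo n (i + 1) S1
  else S
  termination_by n - i

-- 'memo[n] = mex(S)' for the next uncached key n = memo.size
def gAfill (memo : Array Int) : Array Int :=
  let n := memo.size
  let S := gAloop memo n 0 PySem.Set.empty
  memo.push (mexA (S.length + 1) 0 S)

-- fill keys 1..fuel starting from memo = {0: 0}
def gAfillUp (memo : Array Int) : Nat → Array Int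
  | 0 => memo
  | fuel + 1 => gAfillUp (gAfill memo) fuel

def grundy (n : Int) : Int :=
  if n < 0 then 0   -- range(n) is empty for n < 0, so A computes mex(set()) = 0: exact
  else (gAfillUp #[(0 : Int)] n.toNat).getD n.toNat 0

-- ===== PORT B =====
-- B's _mex, the same while loop ported with sufficient fuel (exact, as for mexA)
def mexB (fuel : Nat) (x : Int) (S : PySem.Set Int) : Int :=
  match fuel with
  | 0 => x
  | fuel + 1 => if S.contains x then mexB fuel (x + 1) S else x

-- B's '_table(m)': 'while len(g) < m' ported with fuel m (the length grows by 1 each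
-- pass, starting at 1, so m passes always suffice: exact).  'prev[:-1]' is List.dropLast
-- (exact), 'zip(prev, reversed(prev))' is zipWith over the list and its reverse,
-- '|=' of the second comprehension is Set.update.
def tblGo : Nat → Nat → List Int → List Int
  | 0, _, g => g
  | fuel + 1, m, g =>
      if g.length < m then
        let prev := g
        let seen := PySem.Set.ofList (List.zipWith (PySem.Int.bxor · ·) prev prev.reverse)
        let prev2 := prev.dropLast
        let seen2 := PySem.Set.update seen (List.zipWith (PySem.Int.bxor · ·) prev2 prev2.reverse)
        tblGo fuel m (g ++ [mexB (seen2.length + 1) 0 seen2])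
      else g

def kaylesTable (m : Nat) : List Int := tblGo m m [(0 : Int)]

def tableB : List Int := kaylesTable 83   -- _TABLE = _table(_LIMIT + _PERIOD) = _table(83)

-- indices are always in [0, 82], so the list access never raises: pyGetD is exact here
def grundy_alt (n : Int) : Int :=
  if n < 0 then 0
  else if n < 71 then PySem.List.pyGetD tableB n 0
  else PySem.List.pyGetD tableB (71 + PySem.Int.mod (n - 71) 12) 0

-- ===== PRECONDITION & SPEC =====
-- Pre_ excludes only the region at CPython's default recursion limit, where A's depth-n
-- recursion raises RecursionError (from n = 999 when grundy is called at top level; the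
-- exact cutoff shifts with the caller's stack depth, which is why the margin 981..998 of
-- still-returning inputs is excluded too).
def Pre_grundy (n : Int) : Prop := n ≤ 980
instance (n : Int) : Decidable (Pre_grundy n) := by unfold Pre_grundy; infer_instance
def pvWitness_grundy : Int := 20
def Spec_grundy (n : Int) (out : Int) : Prop := out = grundy_alt n
instance (n : Int) (out : Int) : Decidable (Spec_grundy n out) := by unfold Spec_grundy; infer_instance

-- ===== CLAIM (what is proved, stated in full; the proofs are below) =====
def Claim_equal_grundy : Prop := ∀ (n : Int), Dom_grundy n → Pre_grundy n → Spec_grundy n (grundy n)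

-- ===== LEMMAS AND PROOFS =====

-- Pure reference function: the same recurrence as A, without the memo.
mutual
def gRef (n : Nat) : Int :=
  let S := gRefLoop n 0 PySem.Set.empty
  mexA (S.length + 1) 0 S
  termination_by ((n, 1, 0) : Nat ×ₗ Nat ×ₗ Nat)
def gRefLoop (n i : Nat) (S : PySem.Set Int) : PySem.Set Int :=
  if h : i < n then
    let a := gRef i
    let b := gRef (n - 1 - i)
    let S1 := S.add (PySem.Int.bxor a b)
    if i < n - 1 then
      gRefLoop n (i + 1) (S1.add (PySem.Int.bxor a (gRef (n - 2 - i))))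
    else gRefLoop n (i + 1) S1
  else S
  termination_by ((n, 0, n - i) : Nat ×ₗ Nat ×ₗ Nat)
end

-- ---- mex characterization ----

theorem mexB_eq_mexA (fuel : Nat) : ∀ (x : Int) (S : PySem.Set Int), mexB fuel x S = mexA fuel x S := by
  induction fuel with
  | zero => intro x S; rfl
  | succ f ih =>
      intro x S
      show (if S.contains x then mexB f (x + 1) S else x) = (if S.contains x then mexA f (x + 1) S else x)
      rw [ih]

theorem pigeonA (S : List Int) : ∃ k : Nat, k ≤ S.length ∧ ((k : Int) ∉ S) := by
  by_contra hc
  push_neg at hc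
  have hsub : (Finset.range (S.length + 1)).image (fun k : Nat => (k : Int)) ⊆ S.toFinset := by
    intro x hx
    simp only [Finset.mem_image, Finset.mem_range] at hx
    obtain ⟨k, hk, rfl⟩ := hx
    exact List.mem_toFinset.mpr (hc k (by omega))
  have hcard := Finset.card_le_card hsub
  rw [Finset.card_image_of_injective _ (fun a b h => by exact_mod_cast h)] at hcard
  have := S.toFinset_card_le
  simp [Finset.card_range] at hcard
  omega

theorem pigeonA' (S : List Int) : ∃ k : Nat, ((k : Int) ∉ S) := by
  obtain ⟨k, _, hk⟩ := pigeonA S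
  exact ⟨k, hk⟩

theorem mexA_run (S : List Int) (fuel : Nat) : ∀ (x : Nat),
    x ≤ Nat.find (pigeonA' S) → Nat.find (pigeonA' S) ≤ x + fuel →
    mexA fuel (x : Int) S = ((Nat.find (pigeonA' S) : Nat) : Int) := by
  induction fuel with
  | zero =>
      intro x h1 h2
      have : x = Nat.find (pigeonA' S) := by omega
      subst this; rfl
  | succ f ih =>
      intro x h1 h2
      show (if PySem.Set.contains S (x : Int) then mexA f ((x : Int) + 1) S else (x : Int)) = _
      by_cases hm : ((x : Int)) ∈ S
      · rw [if_pos ((PySem.Set.contains_iff S _).mpr hm)]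
        have hne : x ≠ Nat.find (pigeonA' S) := by
          intro he
          exact (Nat.find_spec (pigeonA' S)) (he ▸ hm)
        have : ((x : Int) + 1) = ((x + 1 : Nat) : Int) := by push_cast; ring
        rw [this]
        exact ih (x + 1) (by omega) (by omega)
      · rw [if_neg (by rw [PySem.Set.contains_iff]; exact hm)]
        have := Nat.find_min' (pigeonA' S) hm
        congr 1
        omega

theorem mexA_eq_find (S : List Int) :
    mexA (S.length + 1) 0 S = ((Nat.find (pigeonA' S) : Nat) : Int) := by
  have h0 : ((0 : Nat) : Int) = (0 : Int) := rfl
  rw [← h0]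
  apply mexA_run
  · omega
  · obtain ⟨k, hk, hmem⟩ := pigeonA S
    have := Nat.find_min' (pigeonA' S) hmem
    omega

theorem mex_ext (S T : List Int) (h : ∀ x : Int, x ∈ S ↔ x ∈ T) :
    mexA (S.length + 1) 0 S = mexA (T.length + 1) 0 T := by
  rw [mexA_eq_find, mexA_eq_find]
  have : Nat.find (pigeonA' S) = Nat.find (pigeonA' T) := by
    apply le_antisymm
    · exact Nat.find_min' _ (by rw [h]; exact Nat.find_spec (pigeonA' T))
    · exact Nat.find_min' _ (by rw [← h]; exact Nat.find_spec (pigeonA' S))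
  rw [this]

-- ---- membership of the reference loop's set ----

theorem mem_gRefLoop (n : Nat) : ∀ (j i : Nat) (S : PySem.Set Int) (x : Int), n - i ≤ j →
    (x ∈ gRefLoop n i S ↔
      x ∈ S ∨ (∃ k, i ≤ k ∧ k < n ∧ x = PySem.Int.bxor (gRef k) (gRef (n - 1 - k))) ∨
        (∃ k, i ≤ k ∧ k < n - 1 ∧ x = PySem.Int.bxor (gRef k) (gRef (n - 2 - k)))) := by
  intro j
  induction j with
  | zero =>
      intro i S x hle
      have hni : ¬ i < n := by omega
      rw [gRefLoop, dif_neg hni]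
      constructor
      · intro h; exact Or.inl h
      · rintro (h | ⟨k, hk1, hk2, _⟩ | ⟨k, hk1, hk2, _⟩)
        · exact h
        · omega
        · omega
  | succ j ihj =>
      intro i S x hle
      by_cases hi : i < n
      · rw [gRefLoop, dif_pos hi]
        by_cases hi2 : i < n - 1
        · rw [if_pos hi2, ihj (i+1) _ x (by omega)]
          simp only [PySem.Set.mem_add]
          constructor
          · rintro ((((hS | h1) | h2) | ⟨k, hk1, hk2, hk3⟩ | ⟨k, hk1, hk2, hk3⟩))
            · exact Or.inl hS
            · exact Or.inr (Or.inl ⟨i, le_refl i, hi, h1⟩)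
            · exact Or.inr (Or.inr ⟨i, le_refl i, hi2, h2⟩)
            · exact Or.inr (Or.inl ⟨k, by omega, hk2, hk3⟩)
            · exact Or.inr (Or.inr ⟨k, by omega, hk2, hk3⟩)
          · rintro (hS | ⟨k, hk1, hk2, hk3⟩ | ⟨k, hk1, hk2, hk3⟩)
            · exact Or.inl (Or.inl (Or.inl hS))
            · rcases Nat.eq_or_lt_of_le hk1 with he | hl
              · exact Or.inl (Or.inl (Or.inr (by rw [← he] at hk3; exact hk3)))
              · exact Or.inr (Or.inl ⟨k, hl, hk2, hk3⟩)
            · rcases Nat.eq_or_lt_of_le hk1 with he | hl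
              · exact Or.inl (Or.inr (by rw [← he] at hk3; exact hk3))
              · exact Or.inr (Or.inr ⟨k, hl, hk2, hk3⟩)
        · rw [if_neg hi2, ihj (i+1) _ x (by omega)]
          simp only [PySem.Set.mem_add]
          constructor
          · rintro (((hS | h1) | ⟨k, hk1, hk2, hk3⟩ | ⟨k, hk1, hk2, hk3⟩))
            · exact Or.inl hS
            · exact Or.inr (Or.inl ⟨i, le_refl i, hi, h1⟩)
            · exact Or.inr (Or.inl ⟨k, by omega, hk2, hk3⟩)
            · exact Or.inr (Or.inr ⟨k, by omega, hk2, hk3⟩)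
          · rintro (hS | ⟨k, hk1, hk2, hk3⟩ | ⟨k, hk1, hk2, hk3⟩)
            · exact Or.inl (Or.inl hS)
            · rcases Nat.eq_or_lt_of_le hk1 with he | hl
              · exact Or.inl (Or.inr (by rw [← he] at hk3; exact hk3))
              · exact Or.inr (Or.inl ⟨k, hl, hk2, hk3⟩)
            · omega
      · rw [gRefLoop, dif_neg hi]
        constructor
        · intro h; exact Or.inl h
        · rintro (h | ⟨k, hk1, hk2, _⟩ | ⟨k, hk1, hk2, _⟩)
          · exact h
          · omega
          · omega

-- ---- the iterative memo fill computes gRef ----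

theorem gAloop_eq (n : Nat) (memo : Array Int)
    (hm : ∀ j, j < n → j < memo.size ∧ memo.getD j 0 = gRef j) :
    ∀ (fuel i : Nat) (S : PySem.Set Int), n - i ≤ fuel → gAloop memo n i S = gRefLoop n i S := by
  intro fuel
  induction fuel with
  | zero =>
      intro i S hle
      have hni : ¬ i < n := by omega
      rw [gAloop, gRefLoop, dif_neg hni, dif_neg hni]
  | succ f ihf =>
      intro i S hle
      by_cases hi : i < n
      · rw [gAloop, gRefLoop, dif_pos hi, dif_pos hi]
        rw [(hm i hi).2, (hm (n - 1 - i) (by omega)).2]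
        by_cases hi2 : i < n - 1
        · rw [if_pos hi2, if_pos hi2, (hm (n - 2 - i) (by omega)).2]
          exact ihf (i + 1) _ (by omega)
        · rw [if_neg hi2, if_neg hi2]
          exact ihf (i + 1) _ (by omega)
      · rw [gAloop, gRefLoop, dif_neg hi, dif_neg hi]

theorem gAfill_spec (memo : Array Int)
    (hm : ∀ j, j < memo.size → memo.getD j 0 = gRef j) :
    (gAfill memo).size = memo.size + 1 ∧
      ∀ j, j < memo.size + 1 → (gAfill memo).getD j 0 = gRef j := by
  have hloop : gAloop memo memo.size 0 PySem.Set.empty = gRefLoop memo.size 0 PySem.Set.empty :=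
    gAloop_eq memo.size memo (fun j hj => ⟨hj, hm j hj⟩) memo.size 0 _ (by omega)
  have hpush : gAfill memo = memo.push (gRef memo.size) := by
    show memo.push (mexA ((gAloop memo memo.size 0 PySem.Set.empty).length + 1) 0
      (gAloop memo memo.size 0 PySem.Set.empty)) = memo.push (gRef memo.size)
    rw [hloop, gRef]
  constructor
  · rw [hpush, Array.size_push]
  · intro j hj
    rw [hpush]
    by_cases hjs : j < memo.size
    · have : (memo.push (gRef memo.size)).getD j 0 = memo.getD j 0 := by
        unfold Array.getD
        rw [dif_pos (by rw [Array.size_push]; omega), dif_pos hjs]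
        exact Array.getElem_push_lt hjs
      rw [this]
      exact hm j hjs
    · have hje : j = memo.size := by omega
      subst hje
      unfold Array.getD
      rw [dif_pos (by rw [Array.size_push]; omega)]
      exact Array.getElem_push_eq

theorem gAfillUp_spec (fuel : Nat) : ∀ (memo : Array Int),
    (∀ j, j < memo.size → memo.getD j 0 = gRef j) →
    (gAfillUp memo fuel).size = memo.size + fuel ∧
      ∀ j, j < memo.size + fuel → (gAfillUp memo fuel).getD j 0 = gRef j := by
  induction fuel with
  | zero =>
      intro memo hm
      exact ⟨rfl, fun j hj => hm j (by omega)⟩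
  | succ f ihf =>
      intro memo hm
      show (gAfillUp (gAfill memo) f).size = _ ∧ _
      have hf := gAfill_spec memo hm
      have h2 := ihf (gAfill memo) (fun j hj => (hf.2 j (by omega)))
      rw [hf.1] at h2
      exact ⟨by rw [h2.1]; omega, fun j hj => h2.2 j (by omega)⟩

theorem grundy_eq_gRef (n : Int) (h : 0 ≤ n) : grundy n = gRef n.toNat := by
  have hbase : ∀ j, j < (#[(0 : Int)] : Array Int).size → (#[(0 : Int)] : Array Int).getD j 0 = gRef j := by
    intro j hj
    have hj0 : j = 0 := by
      have : (#[(0 : Int)] : Array Int).size = 1 := rfl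
      omega
    subst hj0
    show (0 : Int) = gRef 0
    rw [gRef, gRefLoop]
    rfl
  have hs := gAfillUp_spec n.toNat #[(0 : Int)] hbase
  rw [grundy, if_neg (by omega)]
  exact hs.2 n.toNat (by have : (#[(0 : Int)] : Array Int).size = 1 := rfl; omega)

-- ---- B's table computes gRef ----

-- one iteration of B's while-loop body
def entryT (g : List Int) : Int :=
  let seen := PySem.Set.ofList (List.zipWith (PySem.Int.bxor · ·) g g.reverse)
  let prev2 := g.dropLast
  let seen2 := PySem.Set.update seen (List.zipWith (PySem.Int.bxor · ·) prev2 prev2.reverse)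
  mexB (seen2.length + 1) 0 seen2

def stepT (g : List Int) : List Int := g ++ [entryT g]

theorem tblGo_eq_iter (fuel : Nat) : ∀ (m : Nat) (g : List Int), g.length ≤ m → m ≤ g.length + fuel →
    tblGo fuel m g = stepT^[m - g.length] g := by
  induction fuel with
  | zero =>
      intro m g h1 h2
      have : m = g.length := by omega
      subst this
      simp [tblGo]
  | succ f ihf =>
      intro m g h1 h2
      by_cases hlt : g.length < m
      · have hstep : tblGo (f + 1) m g = tblGo f m (stepT g) := by
          show (if g.length < m then _ else g) = _
          rw [if_pos hlt]
          rfl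
        rw [hstep, ihf m (stepT g) (by simp [stepT]; omega) (by simp [stepT]; omega)]
        have hlen : (stepT g).length = g.length + 1 := by simp [stepT]
        rw [hlen]
        have : m - g.length = (m - (g.length + 1)) + 1 := by omega
        rw [this, Function.iterate_succ_apply]
      · have : m = g.length := by omega
        subst this
        show (if g.length < g.length then _ else g) = _
        rw [if_neg hlt]
        simp

-- the next entry produced from a correct prefix is the next reference value
theorem stepT_entry (g : List Int) (h1 : 1 ≤ g.length)
    (hg : ∀ (k : Nat) (hk : k < g.length), g[k] = gRef k) :
    stepT g = g ++ [gRef g.length] := by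
  unfold stepT
  congr 2
  set n := g.length with hn
  set Z1 := List.zipWith (PySem.Int.bxor · ·) g g.reverse with hZ1
  set Z2 := List.zipWith (PySem.Int.bxor · ·) g.dropLast g.dropLast.reverse with hZ2
  have hmem1 : ∀ x : Int, x ∈ Z1 ↔ ∃ k, k < n ∧ x = PySem.Int.bxor (gRef k) (gRef (n - 1 - k)) := by
    intro x
    rw [List.mem_iff_getElem]
    constructor
    · rintro ⟨k, hk, hx⟩
      rw [hZ1, List.length_zipWith, List.length_reverse] at hk
      refine ⟨k, by omega, ?_⟩
      rw [← hx]
      simp only [hZ1, List.getElem_zipWith, List.getElem_reverse]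
      rw [hg k (by omega), hg (g.length - 1 - k) (by omega)]
    · rintro ⟨k, hk, hx⟩
      refine ⟨k, by rw [hZ1, List.length_zipWith, List.length_reverse]; omega, ?_⟩
      simp only [hZ1, List.getElem_zipWith, List.getElem_reverse]
      rw [hg k (by omega), hg (g.length - 1 - k) (by omega), hx]
  have hmem2 : ∀ x : Int, x ∈ Z2 ↔ ∃ k, k < n - 1 ∧ x = PySem.Int.bxor (gRef k) (gRef (n - 2 - k)) := by
    intro x
    rw [List.mem_iff_getElem]
    constructor
    · rintro ⟨k, hk, hx⟩
      rw [hZ2, List.length_zipWith, List.length_reverse, List.length_dropLast] at hk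
      refine ⟨k, by omega, ?_⟩
      rw [← hx]
      simp only [hZ2, List.getElem_zipWith, List.getElem_reverse, List.getElem_dropLast,
        List.length_dropLast]
      rw [hg k (by omega), hg (g.length - 1 - 1 - k) (by omega)]
      have he : g.length - 1 - 1 - k = n - 2 - k := by omega
      rw [he]
    · rintro ⟨k, hk, hx⟩
      refine ⟨k, by rw [hZ2, List.length_zipWith, List.length_reverse, List.length_dropLast]; omega, ?_⟩
      simp only [hZ2, List.getElem_zipWith, List.getElem_reverse, List.getElem_dropLast,
        List.length_dropLast]
      rw [hg k (by omega), hg (g.length - 1 - 1 - k) (by omega), hx]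
      have he : g.length - 1 - 1 - k = n - 2 - k := by omega
      rw [he]
  show mexB ((PySem.Set.update (PySem.Set.ofList Z1) Z2).length + 1) 0
      (PySem.Set.update (PySem.Set.ofList Z1) Z2) = gRef n
  rw [gRef, mexB_eq_mexA]
  show mexA _ 0 _ = mexA ((gRefLoop n 0 PySem.Set.empty).length + 1) 0 (gRefLoop n 0 PySem.Set.empty)
  apply mex_ext
  intro x
  rw [PySem.Set.mem_update, PySem.Set.mem_ofList, hmem1 x, hmem2 x,
      mem_gRefLoop n n 0 PySem.Set.empty x (by omega)]
  constructor
  · rintro (⟨k, hk, hx⟩ | ⟨k, hk, hx⟩)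
    · exact Or.inr (Or.inl ⟨k, by omega, hk, hx⟩)
    · exact Or.inr (Or.inr ⟨k, by omega, hk, hx⟩)
  · rintro (hemp | ⟨k, _, hk, hx⟩ | ⟨k, _, hk, hx⟩)
    · exact absurd hemp (by simp [PySem.Set.empty])
    · exact Or.inl ⟨k, hk, hx⟩
    · exact Or.inr ⟨k, hk, hx⟩

theorem iter_spec (j : Nat) : ∀ (g : List Int), 1 ≤ g.length →
    (∀ (k : Nat) (hk : k < g.length), g[k] = gRef k) →
    (stepT^[j] g).length = g.length + j ∧
      ∀ (k : Nat) (hk : k < (stepT^[j] g).length), (stepT^[j] g)[k] = gRef k := by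
  induction j with
  | zero =>
      intro g h1 hg
      refine ⟨by simp, ?_⟩
      simpa using hg
  | succ j ihj =>
      intro g h1 hg
      rw [Function.iterate_succ_apply]
      have hs := stepT_entry g h1 hg
      have hlen : (stepT g).length = g.length + 1 := by rw [hs]; simp
      have hg' : ∀ (k : Nat) (hk : k < (stepT g).length), (stepT g)[k] = gRef k := by
        intro k hk
        rw [hlen] at hk
        by_cases hkg : k < g.length
        · rw [List.getElem_of_eq hs, List.getElem_append_left hkg]
          exact hg k hkg
        · have hke : k = g.length := by omega
          subst hke
          rw [List.getElem_of_eq hs]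
          simp
      have h2 := ihj (stepT g) (by omega) hg'
      rw [hlen] at h2
      refine ⟨?_, h2.2⟩
      rw [h2.1]
      omega

-- literal tables, verified by kernel computation in chunks
def L83 : List Int := [0, 1, 2, 3, 1, 4, 3, 2, 1, 4, 2, 6, 4, 1, 2, 7, 1, 4, 3, 2, 1, 4, 6, 7, 4, 1, 2, 8, 5, 4, 7, 2, 1, 8, 6, 7, 4, 1, 2, 3, 1, 4, 7, 2, 1, 8, 2, 7, 4, 1, 2, 8, 1, 4, 7, 2, 1, 4, 2, 7, 4, 1, 2, 8, 1, 4, 7, 2, 1, 8, 6, 7, 4, 1, 2, 8, 1, 4, 7, 2, 1, 8, 2]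
def L143 : List Int := [0, 1, 2, 3, 1, 4, 3, 2, 1, 4, 2, 6, 4, 1, 2, 7, 1, 4, 3, 2, 1, 4, 6, 7, 4, 1, 2, 8, 5, 4, 7, 2, 1, 8, 6, 7, 4, 1, 2, 3, 1, 4, 7, 2, 1, 8, 2, 7, 4, 1, 2, 8, 1, 4, 7, 2, 1, 4, 2, 7, 4, 1, 2, 8, 1, 4, 7, 2, 1, 8, 6, 7, 4, 1, 2, 8, 1, 4, 7, 2, 1, 8, 2, 7, 4, 1, 2, 8, 1, 4, 7, 2, 1, 8, 2, 7, 4, 1, 2, 8, 1, 4, 7, 2, 1, 8, 2, 7, 4, 1, 2, 8, 1, 4, 7, 2, 1, 8, 2, 7, 4, 1, 2, 8, 1, 4, 7, 2, 1, 8, 2, 7, 4, 1, 2, 8, 1, 4, 7, 2, 1, 8, 2]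
def L201 : List Int := [0, 1, 2, 3, 1, 4, 3, 2, 1, 4, 2, 6, 4, 1, 2, 7, 1, 4, 3, 2, 1, 4, 6, 7, 4, 1, 2, 8, 5, 4, 7, 2, 1, 8, 6, 7, 4, 1, 2, 3, 1, 4, 7, 2, 1, 8, 2, 7, 4, 1, 2, 8, 1, 4, 7, 2, 1, 4, 2, 7, 4, 1, 2, 8, 1, 4, 7, 2, 1, 8, 6, 7, 4, 1, 2, 8, 1, 4, 7, 2, 1, 8, 2, 7, 4, 1, 2, 8, 1, 4, 7, 2, 1, 8, 2, 7, 4, 1, 2, 8, 1, 4, 7, 2, 1, 8, 2, 7, 4, 1, 2, 8, 1, 4, 7, 2, 1, 8, 2, 7, 4, 1, 2, 8, 1, 4, 7, 2, 1, 8, 2, 7, 4, 1, 2, 8, 1, 4, 7, 2, 1, 8, 2, 7, 4, 1, 2, 8, 1, 4, 7, 2, 1, 8, 2, 7, 4, 1, 2, 8, 1, 4, 7, 2, 1, 8, 2, 7, 4, 1, 2, 8, 1, 4, 7, 2, 1, 8, 2, 7, 4, 1, 2, 8, 1, 4, 7, 2, 1, 8, 2, 7, 4, 1, 2, 8, 1,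 4, 7, 2, 1]


set_option maxRecDepth 20000 in
set_option maxHeartbeats 1000000 in
theorem chunk0 : stepT^[82] [(0 : Int)] = L83 := by decide

set_option maxRecDepth 20000 in
set_option maxHeartbeats 4000000 in
theorem chunk1 : stepT^[60] L83 = L143 := by decide

set_option maxRecDepth 20000 in
set_option maxHeartbeats 4000000 in
theorem chunk2 : stepT^[58] L143 = L201 := by decide

theorem iter200 : stepT^[200] [(0 : Int)] = L201 := by
  have h : (200 : Nat) = 58 + (60 + 82) := by norm_num
  rw [h, Function.iterate_add_apply, Function.iterate_add_apply, chunk0, chunk1, chunk2]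

theorem base_ok : (1 : Nat) ≤ ([(0 : Int)] : List Int).length ∧
    ∀ (k : Nat) (hk : k < ([(0 : Int)] : List Int).length), ([(0 : Int)] : List Int)[k] = gRef k := by
  refine ⟨by simp, ?_⟩
  intro k hk
  have hk0 : k = 0 := by
    have h1 : ([(0 : Int)] : List Int).length = 1 := rfl
    omega
  subst hk0
  show (0 : Int) = gRef 0
  rw [gRef, gRefLoop]
  rfl

theorem gRef_eq_L201 (k : Nat) (hk : k < 201) : gRef k = L201.getD k 0 := by
  have h := iter_spec 200 [(0 : Int)] base_ok.1 base_ok.2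
  rw [iter200] at h
  have hlen : L201.length = 201 := by
    rw [h.1]
    rfl
  rw [List.getD_eq_getElem _ _ (by omega)]
  exact (h.2 k (by omega)).symm

theorem tableB_eq_L83 : tableB = L83 := by
  show kaylesTable 83 = L83
  rw [kaylesTable, tblGo_eq_iter 83 83 [(0 : Int)] (by simp) (by simp)]
  have h82 : (83 : Nat) - ([(0 : Int)] : List Int).length = 82 := rfl
  rw [h82]
  exact chunk0

-- ---- eventual period 12 of gRef, for ALL n ≥ 71 (Guy–Smith style induction) ----

-- pair (unordered) form of the two move clauses
theorem clause_pair (m : Nat) (x : Int) :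
    (∃ k, k < m + 1 ∧ x = PySem.Int.bxor (gRef k) (gRef (m - k))) ↔
      (∃ a b : Nat, a + b = m ∧ x = PySem.Int.bxor (gRef a) (gRef b)) := by
  constructor
  · rintro ⟨k, hk, hx⟩
    exact ⟨k, m - k, by omega, hx⟩
  · rintro ⟨a, b, hab, hx⟩
    refine ⟨a, by omega, ?_⟩
    have : m - a = b := by omega
    rw [this]
    exact hx

-- shifting an unordered split down by 12 under the inductive period hypothesis
theorem pair_shift (n m : Nat) (hm1 : 188 ≤ m) (hm2 : m ≤ n - 1)
    (H : ∀ p, 83 ≤ p → p ≤ n - 1 → gRef p = gRef (p - 12)) (x : Int) :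
    (∃ a b : Nat, a + b = m ∧ x = PySem.Int.bxor (gRef a) (gRef b)) ↔
      (∃ a b : Nat, a + b = m - 12 ∧ x = PySem.Int.bxor (gRef a) (gRef b)) := by
  have swap : ∀ (q : Nat), (∃ a b : Nat, a + b = q ∧ x = PySem.Int.bxor (gRef a) (gRef b)) ↔
      (∃ a b : Nat, a + b = q ∧ a ≤ b ∧ x = PySem.Int.bxor (gRef a) (gRef b)) := by
    intro q
    constructor
    · rintro ⟨a, b, hab, hx⟩
      by_cases hle : a ≤ b
      · exact ⟨a, b, hab, hle, hx⟩
      · exact ⟨b, a, by omega, by omega, by rw [hx, PySem.Int.bxor_comm]⟩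
    · rintro ⟨a, b, hab, _, hx⟩
      exact ⟨a, b, hab, hx⟩
  constructor
  · intro h
    obtain ⟨a, b, hab, hle, hx⟩ := (swap m).mp h
    have hb : 94 ≤ b := by omega
    have hH := H b (by omega) (by omega)
    exact ⟨a, b - 12, by omega, by rw [hx, hH]⟩
  · intro h
    obtain ⟨a, b, hab, hle, hx⟩ := (swap (m - 12)).mp h
    have hb : 88 ≤ b := by omega
    have hH := H (b + 12) (by omega) (by omega)
    have h12 : b + 12 - 12 = b := by omega
    rw [h12] at hH
    exact ⟨a, b + 12, by omega, by rw [hx, ← hH]⟩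

set_option maxRecDepth 10000 in
theorem periodL201 : ∀ k : Nat, 83 ≤ k → k < 201 → L201.getD k 0 = L201.getD (k - 12) 0 := by
  decide

set_option maxHeartbeats 1000000 in
theorem gRef_sub12 : ∀ n : Nat, 83 ≤ n → gRef n = gRef (n - 12) := by
  intro n
  induction n using Nat.strong_induction_on with
  | _ n IH =>
      intro hn
      by_cases hsmall : n < 201
      · rw [gRef_eq_L201 n hsmall, gRef_eq_L201 (n - 12) (by omega)]
        exact periodL201 n hn hsmall
      · push_neg at hsmall
        have H : ∀ p, 83 ≤ p → p ≤ n - 1 → gRef p = gRef (p - 12) :=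
          fun p hp1 hp2 => IH p (by omega) hp1
        have hmem : ∀ x : Int, x ∈ gRefLoop n 0 PySem.Set.empty ↔
            x ∈ gRefLoop (n - 12) 0 PySem.Set.empty := by
          intro x
          rw [mem_gRefLoop n n 0 PySem.Set.empty x (by omega),
              mem_gRefLoop (n - 12) (n - 12) 0 PySem.Set.empty x (by omega)]
          have hemp : ¬ x ∈ (PySem.Set.empty : PySem.Set Int) := by simp [PySem.Set.empty]
          have e1 : (∃ k, 0 ≤ k ∧ k < n ∧ x = PySem.Int.bxor (gRef k) (gRef (n - 1 - k))) ↔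
              ∃ k, k < (n - 1) + 1 ∧ x = PySem.Int.bxor (gRef k) (gRef (n - 1 - k)) := by
            constructor
            · rintro ⟨k, _, hk, hx⟩; exact ⟨k, by omega, hx⟩
            · rintro ⟨k, hk, hx⟩; exact ⟨k, by omega, by omega, hx⟩
          have e2 : (∃ k, 0 ≤ k ∧ k < n - 1 ∧ x = PySem.Int.bxor (gRef k) (gRef (n - 2 - k))) ↔
              ∃ k, k < (n - 2) + 1 ∧ x = PySem.Int.bxor (gRef k) (gRef (n - 2 - k)) := by
            constructor
            · rintro ⟨k, _, hk, hx⟩; exact ⟨k, by omega, hx⟩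
            · rintro ⟨k, hk, hx⟩; exact ⟨k, by omega, by omega, hx⟩
          have e1' : (∃ k, 0 ≤ k ∧ k < n - 12 ∧ x = PySem.Int.bxor (gRef k) (gRef (n - 12 - 1 - k))) ↔
              ∃ k, k < (n - 13) + 1 ∧ x = PySem.Int.bxor (gRef k) (gRef (n - 13 - k)) := by
            constructor
            · rintro ⟨k, _, hk, hx⟩
              exact ⟨k, by omega, by rw [show n - 13 - k = n - 12 - 1 - k by omega]; exact hx⟩
            · rintro ⟨k, hk, hx⟩
              exact ⟨k, by omega, by omega, by rw [show n - 12 - 1 - k = n - 13 - k by omega]; exact hx⟩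
          have e2' : (∃ k, 0 ≤ k ∧ k < n - 12 - 1 ∧ x = PySem.Int.bxor (gRef k) (gRef (n - 12 - 2 - k))) ↔
              ∃ k, k < (n - 14) + 1 ∧ x = PySem.Int.bxor (gRef k) (gRef (n - 14 - k)) := by
            constructor
            · rintro ⟨k, _, hk, hx⟩
              exact ⟨k, by omega, by rw [show n - 14 - k = n - 12 - 2 - k by omega]; exact hx⟩
            · rintro ⟨k, hk, hx⟩
              exact ⟨k, by omega, by omega, by rw [show n - 12 - 2 - k = n - 14 - k by omega]; exact hx⟩
          have hs1 := pair_shift n (n - 1) (by omega) (by omega) H x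
          have hs2 := pair_shift n (n - 2) (by omega) (by omega) H x
          rw [show n - 1 - 12 = n - 13 by omega] at hs1
          rw [show n - 2 - 12 = n - 14 by omega] at hs2
          exact or_congr Iff.rfl (or_congr
            (e1.trans (((clause_pair (n - 1) x).trans hs1).trans
              (((clause_pair (n - 13) x).symm).trans e1'.symm)))
            (e2.trans (((clause_pair (n - 2) x).trans hs2).trans
              (((clause_pair (n - 14) x).symm).trans e2'.symm))))
        rw [gRef, gRef]
        exact mex_ext _ _ hmem

theorem gRef_period_all (k : Nat) (hk : 71 ≤ k) : gRef k = gRef (71 + (k - 71) % 12) := by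
  induction k using Nat.strong_induction_on with
  | _ k IH =>
      by_cases h83 : k < 83
      · have : 71 + (k - 71) % 12 = k := by omega
        rw [this]
      · push_neg at h83
        have hstep := gRef_sub12 k h83
        have hIH := IH (k - 12) (by omega) (by omega)
        rw [hstep, hIH]
        have : (k - 12 - 71) % 12 = (k - 71) % 12 := by omega
        rw [this]

theorem L83_getD (k : Nat) (hk : k < 83) : L83.getD k 0 = gRef k := by
  have h := iter_spec 200 [(0 : Int)] base_ok.1 base_ok.2
  rw [iter200] at h
  have hlen : L201.length = 201 := by rw [h.1]; rfl
  have hag : L83.getD k 0 = L201.getD k 0 := by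
    have : L201.getD k 0 = (L201.take 83).getD k 0 := by
      rw [List.getD_eq_getElem _ _ (by omega), List.getD_eq_getElem _ _ (by simp [hlen]; omega)]
      simp
    rw [this]
    rfl
  rw [hag, ← gRef_eq_L201 k (by omega)]

-- ===== VERDICT (by name: the statement is the Claim_ definition above) =====
theorem grundy_spec : Claim_equal_grundy := by
  intro n _ hpre
  unfold Spec_grundy
  unfold Pre_grundy at hpre
  by_cases hn : n < 0
  · rw [grundy, grundy_alt, if_pos hn, if_pos hn]
  · push_neg at hn
    rw [grundy_eq_gRef n hn]
    rw [grundy_alt, if_neg (by omega)]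
    by_cases h71 : n < 71
    · rw [if_pos h71, tableB_eq_L83]
      rw [show n = ((n.toNat : Nat) : Int) by omega, PySem.List.pyGetD_natCast,
        Int.toNat_natCast, L83_getD n.toNat (by omega)]
    · rw [if_neg h71]
      have hm : PySem.Int.mod (n - 71) 12 = (n - 71) % 12 :=
        PySem.Int.mod_eq_emod_of_pos (by norm_num)
      have hmod : (71 : Int) + PySem.Int.mod (n - 71) 12 = ((71 + (n.toNat - 71) % 12 : Nat) : Int) := by
        rw [hm]
        have h1 : (n - 71 : Int) = ((n.toNat - 71 : Nat) : Int) := by omega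
        rw [h1]
        push_cast
        omega
      rw [hmod, PySem.List.pyGetD_natCast, tableB_eq_L83]
      have hmlt : (n.toNat - 71) % 12 < 12 := Nat.mod_lt _ (by norm_num)
      rw [L83_getD (71 + (n.toNat - 71) % 12) (by omega)]
      rw [← gRef_period_all n.toNat (by omega)]
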